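-- pv_equiv track=rewrite | github.com/sergiocalde94/advent-of-code-2024 | 10/utils/resolvers.py | _split_hiking_routes
-- ===== SOURCE A (Python) =====
-- def _split_hiking_routes(routes: list, x: int, y: int) -> list:
--     """Splits the hiking routes into distinct sub-routes.
--
--     Routes are split whenever they return to the starting position `(x, y)`.
--
--     Args:
--         routes (list): A list of positions representing the hiking routes.
--         x (int): The x-coordinate of the starting position.
--         y (int): The y-coordinate of the starting position.
--
--     Returns:
--         list: A list of sub-routes, where each sub-route is a list of positions.
--     """
--     split_routes = []
--     current_route = []
--
--     for position in routes:
--         if position == (x, y) and current_route: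
--             split_routes.append(current_route)
--             current_route = []
--         current_route.append(position)
--
--     if current_route:
--         split_routes.append(current_route)
--
--     return split_routes
-- ===== SOURCE B (Python) =====
-- def _split_hiking_routes(routes: list, x: int, y: int) -> list:
--     """Two-pointer re-implementation: find each segment's end index, then slice.
--
--     A segment starts at i and runs until the next later index whose position
--     equals the start position (x, y).
--     """
--     target = (x, y)
--     result = []
--     i = 0
--     n = len(routes)
--     while i < n:
--         j = i + 1
--         while j < n and routes[j] != target:
--             j += 1
--         result.append(routes[i:j])
--         i = j
--     return result
-- ===== Notes on version B (the rewrite author's own statement) =====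
-- stated objective: alternative
-- what changed: Replaced A's per-element accumulation into a growing current_route (with repeated list appends and a flush at the end) by a two-pointer scan that locates each segment's end index and emits the segment as one slice routes[i:j].
import Mathlib
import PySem

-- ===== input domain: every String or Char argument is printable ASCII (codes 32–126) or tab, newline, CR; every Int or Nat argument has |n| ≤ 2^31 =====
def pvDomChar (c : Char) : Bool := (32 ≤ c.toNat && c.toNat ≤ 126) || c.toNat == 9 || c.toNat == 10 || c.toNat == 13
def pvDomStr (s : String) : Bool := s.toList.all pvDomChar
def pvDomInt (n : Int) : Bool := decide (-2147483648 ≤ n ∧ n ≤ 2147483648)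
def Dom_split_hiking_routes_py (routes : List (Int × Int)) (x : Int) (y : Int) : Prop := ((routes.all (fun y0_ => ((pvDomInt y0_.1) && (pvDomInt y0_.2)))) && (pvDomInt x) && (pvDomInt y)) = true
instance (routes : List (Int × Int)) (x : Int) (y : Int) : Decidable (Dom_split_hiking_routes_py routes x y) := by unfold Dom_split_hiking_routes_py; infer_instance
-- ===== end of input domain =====

-- ===== PORT A =====
-- B changes the decomposition: A accumulates positions one by one into current_route
-- and flushes it at split points; B two-pointer-scans for each segment's end and slices.
def split_hiking_routes_py (routes : List (Int × Int)) (x : Int) (y : Int) : List (List (Int × Int)) :=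
  -- for position in routes: if position == (x, y) and current_route: flush; current_route.append(position)
  let st := routes.foldl
    (fun (st : List (List (Int × Int)) × List (Int × Int)) position =>
      if position = (x, y) ∧ st.2 ≠ [] then (st.1 ++ [st.2], [position])
      else (st.1, st.2 ++ [position]))
    ([], [])
  -- if current_route: split_routes.append(current_route)
  if st.2 ≠ [] then st.1 ++ [st.2] else st.1

-- ===== PORT B =====
-- Helper = B's outer while loop on the suffix starting at i; the inner
-- 'while j < n and routes[j] != target: j += 1' scan is the takeWhile/dropWhile
-- split of the tail, and routes[i:j] is the head consed onto the scanned prefix.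
def splitGo (p : Int × Int) : List (Int × Int) → List (List (Int × Int))
  | [] => []
  | a :: t =>
      (a :: t.takeWhile (fun q => q != p)) :: splitGo p (t.dropWhile (fun q => q != p))
  termination_by l => l.length
  decreasing_by
    simpa using Nat.lt_succ_of_le (List.Sublist.length_le (List.dropWhile_sublist _))

def split_hiking_routes_py_alt (routes : List (Int × Int)) (x : Int) (y : Int) : List (List (Int × Int)) :=
  splitGo (x, y) routes

-- ===== PRECONDITION & SPEC =====
def Spec_split_hiking_routes_py (routes : List (Int × Int)) (x : Int) (y : Int) (out : List (List (Int × Int))) : Prop := out = split_hiking_routes_py_alt routes x y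
instance (routes : List (Int × Int)) (x : Int) (y : Int) (out : List (List (Int × Int))) : Decidable (Spec_split_hiking_routes_py routes x y out) := by unfold Spec_split_hiking_routes_py; infer_instance

-- ===== CLAIM (what is proved, stated in full; the proofs are below) =====
def Claim_equal_split_hiking_routes_py : Prop := ∀ (routes : List (Int × Int)) (x : Int) (y : Int), Dom_split_hiking_routes_py routes x y → Spec_split_hiking_routes_py routes x y (split_hiking_routes_py routes x y)

-- ===== LEMMAS AND PROOFS =====

-- Intermediate characterisation of A's loop while current_route is non-empty.
def consume (p : Int × Int) (C : List (Int × Int)) : List (Int × Int) → List (List (Int × Int))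
  | [] => [C]
  | a :: t => if a = p then C :: consume p [a] t else consume p (C ++ [a]) t

lemma consume_spec (p : Int × Int) :
    ∀ (t : List (Int × Int)) (C : List (Int × Int)),
      consume p C t
        = (C ++ t.takeWhile (fun q => q != p)) :: splitGo p (t.dropWhile (fun q => q != p)) := by
  intro t
  induction t with
  | nil => intro C; simp [consume, splitGo]
  | cons a t ih =>
      intro C
      by_cases h : a = p
      · simp [consume, h, splitGo, ih]
      · simp [consume, h, ih]

lemma loop_spec (p : Int × Int) :
    ∀ (t : List (Int × Int)) (S : List (List (Int × Int))) (C : List (Int × Int)), C ≠ [] →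
      (let st := t.foldl
        (fun (st : List (List (Int × Int)) × List (Int × Int)) position =>
          if position = p ∧ st.2 ≠ [] then (st.1 ++ [st.2], [position])
          else (st.1, st.2 ++ [position])) (S, C)
       if st.2 ≠ [] then st.1 ++ [st.2] else st.1)
        = S ++ consume p C t := by
  intro t
  induction t with
  | nil => intro S C hC; simp [consume, hC]
  | cons a t ih =>
      intro S C hC
      by_cases h : a = p
      · have := ih (S ++ [C]) [a] (by simp)
        simpa [consume, h, hC, List.foldl_cons, List.append_assoc] using this
      · have := ih S (C ++ [a]) (by simp)
        simpa [consume, h, hC, List.foldl_cons] using this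

-- ===== VERDICT (by name: the statement is the Claim_ definition above) =====
theorem split_hiking_routes_py_spec : Claim_equal_split_hiking_routes_py := by
  intro routes x y _
  unfold Spec_split_hiking_routes_py split_hiking_routes_py split_hiking_routes_py_alt
  cases routes with
  | nil => simp [splitGo]
  | cons a t =>
      have h := loop_spec (x, y) t [] [a] (by simp)
      simp only [List.foldl_cons, if_neg (by simp : ¬ (a = (x, y) ∧ ([] : List (Int × Int)) ≠ []))]
      simpa [consume_spec, splitGo] using h
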